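-- pv_equiv track=rewrite | github.com/NicolasCergy/Lilliput_analysis | attack.py | process_structure
-- ===== SOURCE A (Python) =====
-- def process_structure(tab_couples, cs) :
--     result=0
--     size = len(tab_couples)
--
--     for i in range(size-1):
--         for j in range(i+1, size):
--             success=1
--
--             #For each equation
--             for equation in cs :
--                 result_temp=0
--
--                 for condition in equation :
--                     #Condition on I or S
--                     if condition[0] < 2:
--                         result_temp^=tab_couples[i][condition[0]][condition[1]]
--                         result_temp^=tab_couples[j][condition[0]][condition[1]]
--
--
--                     elif condition[0] == 2:
--                         result_temp^=tab_couples[i][1][condition[1]]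
--                         result_temp^=tab_couples[j][1][condition[1]]
--                         result_temp^=condition[1]
--
--                 if result_temp != 0:
--                     success=0
--
--             if success==1 :
--                 result+=1
--     return result
-- ===== SOURCE B (Python) =====
-- def process_structure(tab_couples, cs):
--     # Pair (i,j) succeeds iff for every equation: sig(i) ^ sig(j) ^ const(eq) == 0.
--     # Precompute per-element signature vectors once, then count matching pairs
--     # with a running hash-map of signatures seen so far.
--     if len(tab_couples) < 2:
--         return 0
--
--     consts = []
--     for equation in cs:
--         c = 0
--         for condition in equation:
--             if condition[0] == 2:
--                 c ^= condition[1]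
--         consts.append(c)
--
--     def signature(t):
--         v = []
--         for equation in cs:
--             s = 0
--             for condition in equation:
--                 if condition[0] < 2:
--                     s ^= t[condition[0]][condition[1]]
--                 elif condition[0] == 2:
--                     s ^= t[1][condition[1]]
--             v.append(s)
--         return tuple(v)
--
--     sigs = [signature(t) for t in tab_couples]
--
--     result = 0
--     seen = {}
--     for s in sigs:
--         target = tuple(a ^ b for a, b in zip(s, consts))
--         result += seen.get(target, 0)
--         seen[s] = seen.get(s, 0) + 1
--     return result
-- ===== Notes on version B (the rewrite author's own statement) =====
-- stated objective: faster
-- what changed: Instead of testing every pair with the full equation scan (O(n^2*E*C)), B precomputes one XOR signature vector per element plus a per-equation constant vector, and counts matching pairs in one pass with a hash map keyed by signatures (pair (i,j) succeeds iff sig(i) = sig(j) XOR const).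
import Mathlib
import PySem

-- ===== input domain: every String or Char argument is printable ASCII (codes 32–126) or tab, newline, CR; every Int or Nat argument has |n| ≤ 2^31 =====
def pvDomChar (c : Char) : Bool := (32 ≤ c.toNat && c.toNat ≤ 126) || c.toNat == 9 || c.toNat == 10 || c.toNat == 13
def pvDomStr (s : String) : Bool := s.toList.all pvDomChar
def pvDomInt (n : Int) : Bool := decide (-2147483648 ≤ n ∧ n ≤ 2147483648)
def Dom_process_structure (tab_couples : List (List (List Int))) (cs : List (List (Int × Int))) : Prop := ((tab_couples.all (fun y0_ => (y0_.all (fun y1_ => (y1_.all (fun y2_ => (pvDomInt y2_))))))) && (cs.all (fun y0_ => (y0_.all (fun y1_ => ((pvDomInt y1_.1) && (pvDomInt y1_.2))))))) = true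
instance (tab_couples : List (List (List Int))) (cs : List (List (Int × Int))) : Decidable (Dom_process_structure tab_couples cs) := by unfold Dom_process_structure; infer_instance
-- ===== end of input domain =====

-- B replaces A's per-pair equation scan by precomputed per-element XOR signature
-- vectors counted with a hash map in one pass (asymptotically faster in a timing run).

-- ===== PORT A =====
def process_structure (tab_couples : List (List (List Int))) (cs : List (List (Int × Int))) : Int :=
  let size : Int := tab_couples.length
  (PySem.List.pyRange 0 (size - 1) 1).foldl (fun result i =>
    (PySem.List.pyRange (i + 1) size 1).foldl (fun result j =>
      let success : Int := cs.foldl (fun success equation =>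
        let result_temp : Int := equation.foldl (fun result_temp condition =>
          if condition.1 < 2 then
            PySem.Int.bxor
              (PySem.Int.bxor result_temp
                (PySem.List.pyGetD (PySem.List.pyGetD (PySem.List.pyGetD tab_couples i []) condition.1 []) condition.2 0))
              (PySem.List.pyGetD (PySem.List.pyGetD (PySem.List.pyGetD tab_couples j []) condition.1 []) condition.2 0)
          else if condition.1 = 2 then
            PySem.Int.bxor
              (PySem.Int.bxor
                (PySem.Int.bxor result_temp
                  (PySem.List.pyGetD (PySem.List.pyGetD (PySem.List.pyGetD tab_couples i []) 1 []) condition.2 0))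
                (PySem.List.pyGetD (PySem.List.pyGetD (PySem.List.pyGetD tab_couples j []) 1 []) condition.2 0))
              condition.2
          else result_temp) 0
        if result_temp ≠ 0 then 0 else success) 1
      if success = 1 then result + 1 else result) result) 0

-- ===== PORT B =====
-- B helper: XOR of the constant terms of one equation
def psAltConst (equation : List (Int × Int)) : Int :=
  equation.foldl (fun c condition => if condition.1 = 2 then PySem.Int.bxor c condition.2 else c) 0

-- B helper: per-element signature vector (one XOR per equation)
def psAltSig (cs : List (List (Int × Int))) (t : List (List Int)) : List Int :=
  cs.foldl (fun v equation =>
    v ++ [equation.foldl (fun s condition =>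
      if condition.1 < 2 then
        PySem.Int.bxor s (PySem.List.pyGetD (PySem.List.pyGetD t condition.1 []) condition.2 0)
      else if condition.1 = 2 then
        PySem.Int.bxor s (PySem.List.pyGetD (PySem.List.pyGetD t 1 []) condition.2 0)
      else s) 0]) []

def process_structure_alt (tab_couples : List (List (List Int))) (cs : List (List (Int × Int))) : Int :=
  if tab_couples.length < 2 then 0 else
  let consts : List Int := cs.foldl (fun acc equation => acc ++ [psAltConst equation]) []
  let sigs : List (List Int) := tab_couples.map (psAltSig cs)
  (sigs.foldl (fun (st : PySem.Dict (List Int) Int × Int) s =>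
      let target := (s.zip consts).map (fun p => PySem.Int.bxor p.1 p.2)
      (st.1.modify s 0 (· + 1), st.2 + st.1.getD target 0))
    (PySem.Dict.empty, 0)).2

-- ===== PRECONDITION & SPEC =====
-- Pre_ excludes exactly the inputs on which the Python A raises IndexError: when there
-- are at least two elements, every index used by some condition must be in range.
def Pre_process_structure (tab_couples : List (List (List Int))) (cs : List (List (Int × Int))) : Prop :=
  2 ≤ tab_couples.length →
    ∀ t ∈ tab_couples, ∀ equation ∈ cs, ∀ condition ∈ equation,
      (condition.1 < 2 →
        PySem.Raise.InRange t.length condition.1 ∧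
        PySem.Raise.InRange (PySem.List.pyGetD t condition.1 []).length condition.2) ∧
      (condition.1 = 2 →
        PySem.Raise.InRange t.length 1 ∧
        PySem.Raise.InRange (PySem.List.pyGetD t 1 []).length condition.2)
instance (tab_couples : List (List (List Int))) (cs : List (List (Int × Int))) : Decidable (Pre_process_structure tab_couples cs) := by unfold Pre_process_structure; infer_instance

def pvWitness_process_structure : List (List (List Int)) × (List (List (Int × Int))) :=
  ([[[0], [1]], [[0], [3]]], [[(0, 0), (2, 0)]])

def Spec_process_structure (tab_couples : List (List (List Int))) (cs : List (List (Int × Int))) (out : Int) : Prop := out = process_structure_alt tab_couples cs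
instance (tab_couples : List (List (List Int))) (cs : List (List (Int × Int))) (out : Int) : Decidable (Spec_process_structure tab_couples cs out) := by unfold Spec_process_structure; infer_instance

-- ===== CLAIM (what is proved, stated in full; the proofs are below) =====
def Claim_equal_process_structure : Prop := ∀ (tab_couples : List (List (List Int))) (cs : List (List (Int × Int))), Dom_process_structure tab_couples cs → Pre_process_structure tab_couples cs → Spec_process_structure tab_couples cs (process_structure tab_couples cs)

-- ===== LEMMAS AND PROOFS =====

theorem bxN2 (m n : Nat) : PySem.Int.bxor ((m:Nat):Int) (Int.negSucc n) = Int.negSucc (m ^^^ n) := by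
  have h1 : ¬ (0:Int) ≤ Int.negSucc n := by omega
  have h2 : (-(Int.negSucc n) - 1).toNat = n := by omega
  simp [PySem.Int.bxor, Int.negSucc_eq]; omega
theorem bxN3 (m n : Nat) : PySem.Int.bxor (Int.negSucc m) ((n:Nat):Int) = Int.negSucc (m ^^^ n) := by
  have h1 : ¬ (0:Int) ≤ Int.negSucc m := by omega
  have h2 : (-(Int.negSucc m) - 1).toNat = m := by omega
  simp [PySem.Int.bxor, Int.negSucc_eq]; omega
theorem bxN4 (m n : Nat) : PySem.Int.bxor (Int.negSucc m) (Int.negSucc n) = ((m ^^^ n : Nat) : Int) := by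
  have h1 : ¬ (0:Int) ≤ Int.negSucc m := by omega
  have h1' : ¬ (0:Int) ≤ Int.negSucc n := by omega
  have h2 : (-(Int.negSucc m) - 1).toNat = m := by omega
  have h2' : (-(Int.negSucc n) - 1).toNat = n := by omega
  simp [PySem.Int.bxor, h1, h1']

theorem bx_assoc (a b c : Int) : PySem.Int.bxor (PySem.Int.bxor a b) c = PySem.Int.bxor a (PySem.Int.bxor b c) := by
  rcases a with m | m <;> rcases b with n | n <;> rcases c with k | k <;>
    simp [bxN2, bxN3, bxN4, Nat.xor_assoc]

theorem bx_zero_left (a : Int) : PySem.Int.bxor 0 a = a := by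
  rw [PySem.Int.bxor_comm]; exact PySem.Int.bxor_zero a

theorem bx_eq_zero_iff (a b : Int) : PySem.Int.bxor a b = 0 ↔ a = b := by
  constructor
  · intro h
    have := congrArg (fun x => PySem.Int.bxor x b) h
    simpa [bx_assoc, bx_zero_left, PySem.Int.bxor_self, PySem.Int.bxor_zero] using this
  · intro h; subst h; exact PySem.Int.bxor_self _

def psX {α : Type} (h : α → Int) (l : List α) : Int :=
  l.foldl (fun r c => PySem.Int.bxor r (h c)) 0

theorem psX_shift {α : Type} (h : α → Int) (l : List α) (a : Int) :
    l.foldl (fun r c => PySem.Int.bxor r (h c)) a = PySem.Int.bxor a (psX h l) := by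
  induction l generalizing a with
  | nil => simp [psX]
  | cons c l ih =>
    simp only [psX, List.foldl_cons, bx_zero_left]
    rw [ih, ih (h c), ← bx_assoc]

theorem psX_cons {α : Type} (h : α → Int) (c : α) (l : List α) :
    psX h (c :: l) = PySem.Int.bxor (h c) (psX h l) := by
  simp only [psX, List.foldl_cons, bx_zero_left]; rw [psX_shift]; rfl

theorem bx_mix (a b x y : Int) :
    PySem.Int.bxor (PySem.Int.bxor a b) (PySem.Int.bxor x y) =
    PySem.Int.bxor (PySem.Int.bxor a x) (PySem.Int.bxor b y) := by
  rw [bx_assoc, bx_assoc]; congr 1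
  rw [← bx_assoc, ← bx_assoc, PySem.Int.bxor_comm b x]

theorem psX_split {α : Type} (f g : α → Int) (l : List α) :
    psX (fun c => PySem.Int.bxor (f c) (g c)) l = PySem.Int.bxor (psX f l) (psX g l) := by
  induction l with
  | nil => simp [psX]
  | cons c l ih => rw [psX_cons, psX_cons, psX_cons, ih, bx_mix]

def psHI (t : List (List Int)) (c : Int × Int) : Int :=
  if c.1 < 2 then PySem.List.pyGetD (PySem.List.pyGetD t c.1 []) c.2 0
  else if c.1 = 2 then PySem.List.pyGetD (PySem.List.pyGetD t 1 []) c.2 0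
  else 0

def psHC (c : Int × Int) : Int := if c.1 = 2 then c.2 else 0

def psSigL (cs : List (List (Int × Int))) (t : List (List Int)) : List Int :=
  cs.map (fun eq => psX (psHI t) eq)

def psTgtL (cs : List (List (Int × Int))) (t : List (List Int)) : List Int :=
  cs.map (fun eq => PySem.Int.bxor (psX (psHI t) eq) (psX psHC eq))

-- B's inner equation fold is psX (psHI t)
theorem sigB_eq (t : List (List Int)) (eq : List (Int × Int)) :
    eq.foldl (fun s condition =>
      if condition.1 < 2 then
        PySem.Int.bxor s (PySem.List.pyGetD (PySem.List.pyGetD t condition.1 []) condition.2 0)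
      else if condition.1 = 2 then
        PySem.Int.bxor s (PySem.List.pyGetD (PySem.List.pyGetD t 1 []) condition.2 0)
      else s) 0 = psX (psHI t) eq := by
  unfold psX
  apply PySem.List.foldl_congr_mem
  intro acc c _
  unfold psHI
  split_ifs <;> simp [PySem.Int.bxor_zero]

-- B's const fold is psX psHC
theorem constB_eq (eq : List (Int × Int)) :
    eq.foldl (fun c condition => if condition.1 = 2 then PySem.Int.bxor c condition.2 else c) 0
      = psX psHC eq := by
  unfold psX
  apply PySem.List.foldl_congr_mem
  intro acc c _
  unfold psHC
  split_ifs <;> simp [PySem.Int.bxor_zero]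

-- A's inner equation fold for the pair (ti, tj)
theorem rtA_eq (ti tj : List (List Int)) (eq : List (Int × Int)) :
    eq.foldl (fun result_temp condition =>
      if condition.1 < 2 then
        PySem.Int.bxor
          (PySem.Int.bxor result_temp
            (PySem.List.pyGetD (PySem.List.pyGetD ti condition.1 []) condition.2 0))
          (PySem.List.pyGetD (PySem.List.pyGetD tj condition.1 []) condition.2 0)
      else if condition.1 = 2 then
        PySem.Int.bxor
          (PySem.Int.bxor
            (PySem.Int.bxor result_temp
              (PySem.List.pyGetD (PySem.List.pyGetD ti 1 []) condition.2 0))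
            (PySem.List.pyGetD (PySem.List.pyGetD tj 1 []) condition.2 0))
          condition.2
      else result_temp) 0
    = PySem.Int.bxor (psX (psHI ti) eq) (PySem.Int.bxor (psX (psHI tj) eq) (psX psHC eq)) := by
  have h1 : eq.foldl (fun result_temp condition =>
      if condition.1 < 2 then
        PySem.Int.bxor
          (PySem.Int.bxor result_temp
            (PySem.List.pyGetD (PySem.List.pyGetD ti condition.1 []) condition.2 0))
          (PySem.List.pyGetD (PySem.List.pyGetD tj condition.1 []) condition.2 0)
      else if condition.1 = 2 then
        PySem.Int.bxor
          (PySem.Int.bxor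
            (PySem.Int.bxor result_temp
              (PySem.List.pyGetD (PySem.List.pyGetD ti 1 []) condition.2 0))
            (PySem.List.pyGetD (PySem.List.pyGetD tj 1 []) condition.2 0))
          condition.2
      else result_temp) 0
    = psX (fun c => PySem.Int.bxor (psHI ti c) (PySem.Int.bxor (psHI tj c) (psHC c))) eq := by
    unfold psX
    apply PySem.List.foldl_congr_mem
    intro acc c _
    by_cases h : c.1 < 2
    · have h2 : ¬ c.1 = 2 := by omega
      simp only [psHI, psHC, if_pos h, if_neg h2]
      rw [bx_assoc]; congr 1; rw [PySem.Int.bxor_zero]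
    · by_cases h2 : c.1 = 2
      · simp only [psHI, psHC, if_neg h, if_pos h2]
        rw [bx_assoc, bx_assoc]
      · simp only [psHI, psHC, if_neg h, if_neg h2]
        rw [bx_zero_left, PySem.Int.bxor_zero, PySem.Int.bxor_zero]
  rw [h1, psX_split (f := fun c => psHI ti c)
      (g := fun c => PySem.Int.bxor (psHI tj c) (psHC c)),
    psX_split (f := fun c => psHI tj c) (g := psHC)]

-- success flag fold
theorem succ_fold (rt : List (Int × Int) → Int) (cs : List (List (Int × Int))) (v : Int) :
    cs.foldl (fun success eq => if rt eq ≠ 0 then 0 else success) v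
      = if cs.all (fun eq => rt eq == 0) then v else 0 := by
  induction cs generalizing v with
  | nil => simp
  | cons e cs ih =>
    rw [List.foldl_cons, List.all_cons]
    by_cases h : rt e = 0
    · rw [if_neg (by simpa using h), ih]
      simp [h]
    · rw [if_pos (by simpa using h), ih]
      simp [h]

theorem psFoldlAdd (l : List Int) (g : Int → Int) (a : Int) :
    l.foldl (fun r j => r + g j) a = a + (l.map g).sum := by
  induction l generalizing a with
  | nil => simp
  | cons x l ih => simp only [List.foldl_cons, List.map_cons, List.sum_cons, ih]; ring

def psQI (cs : List (List (Int × Int))) (tab : List (List (List Int))) (a b : Nat) : Int :=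
  if psSigL cs (tab.getD a []) = psTgtL cs (tab.getD b []) then 1 else 0

theorem sum_map_range (f : Nat → Int) (n : Nat) :
    ((List.range n).map f).sum = ∑ i ∈ Finset.range n, f i := by
  induction n with
  | zero => simp
  | succ n ih => rw [List.range_succ]; simp [ih, Finset.sum_range_succ]

theorem Ico_filter_lt (a n : Nat) :
    Finset.Ico (a+1) n = (Finset.range n).filter (fun j => a < j) := by
  ext j; simp [Finset.mem_Ico, Finset.mem_filter, Finset.mem_range]; omega

theorem range_filter_lt (j n : Nat) (h : j ≤ n) :
    Finset.range j = (Finset.range n).filter (fun i => i < j) := by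
  ext i; simp [Finset.mem_filter, Finset.mem_range]; omega

theorem getD_pyGetD (tab : List (List (List Int))) (i : Int) (hi : 0 ≤ i) :
    PySem.List.pyGetD tab i [] = tab.getD i.toNat [] := by
  conv_lhs => rw [show i = ((i.toNat : Nat) : Int) by omega, PySem.List.pyGetD_natCast]

theorem psInnerSum (tab : List (List (List Int))) (cs : List (List (Int × Int)))
    (i : Int) (hi : 0 ≤ i) (r : Int) :
    (PySem.List.pyRange (i + 1) (tab.length : Int) 1).foldl (fun result j =>
      if (cs.foldl (fun success equation =>
        if (equation.foldl (fun result_temp condition =>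
            if condition.1 < 2 then
              PySem.Int.bxor
                (PySem.Int.bxor result_temp
                  (PySem.List.pyGetD (PySem.List.pyGetD (PySem.List.pyGetD tab i []) condition.1 []) condition.2 0))
                (PySem.List.pyGetD (PySem.List.pyGetD (PySem.List.pyGetD tab j []) condition.1 []) condition.2 0)
            else if condition.1 = 2 then
              PySem.Int.bxor
                (PySem.Int.bxor
                  (PySem.Int.bxor result_temp
                    (PySem.List.pyGetD (PySem.List.pyGetD (PySem.List.pyGetD tab i []) 1 []) condition.2 0))
                  (PySem.List.pyGetD (PySem.List.pyGetD (PySem.List.pyGetD tab j []) 1 []) condition.2 0))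
                condition.2
            else result_temp) 0) ≠ 0 then 0 else success) (1:Int)) = 1 then result + 1 else result) r
    = r + ∑ b ∈ Finset.range tab.length, (if i.toNat < b then psQI cs tab i.toNat b else 0) := by
  rw [PySem.List.foldl_congr_mem
      (g := fun result j => result + psQI cs tab i.toNat j.toNat)]
  · rw [psFoldlAdd _ (fun j : Int => psQI cs tab i.toNat j.toNat) r]
    congr 1
    rw [PySem.List.pyRange_one, List.map_map, sum_map_range]
    have hm : ((tab.length : Int) - (i + 1)).toNat = tab.length - (i.toNat + 1) := by omega
    rw [hm]
    have hstep : ∀ k ∈ Finset.range (tab.length - (i.toNat + 1)),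
        ((fun j : Int => psQI cs tab i.toNat j.toNat) ∘ (fun k : Nat => i + 1 + (k:Int))) k
        = psQI cs tab i.toNat (i.toNat + 1 + k) := by
      intro k hk
      simp only [Function.comp_apply]
      congr 1
      omega
    rw [Finset.sum_congr rfl hstep, ← Finset.sum_Ico_eq_sum_range, Ico_filter_lt, Finset.sum_filter]
  · intro acc j hj
    have hj' : 0 ≤ j := by
      rw [PySem.List.mem_pyRange_one] at hj; omega
    simp only [rtA_eq]
    simp only [succ_fold]
    rw [getD_pyGetD tab i hi, getD_pyGetD tab j hj']
    have hiff : (cs.all fun eq => PySem.Int.bxor (psX (psHI (tab.getD i.toNat [])) eq)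
        (PySem.Int.bxor (psX (psHI (tab.getD j.toNat [])) eq) (psX psHC eq)) == 0) = true
        ↔ psSigL cs (tab.getD i.toNat []) = psTgtL cs (tab.getD j.toNat []) := by
      unfold psSigL psTgtL
      rw [List.map_inj_left]
      simp only [List.all_eq_true, beq_iff_eq]
      constructor
      · intro hall eq he; exact (bx_eq_zero_iff _ _).mp (hall eq he)
      · intro hall eq he; exact (bx_eq_zero_iff _ _).mpr (hall eq he)
    unfold psQI
    by_cases hQ : psSigL cs (tab.getD i.toNat []) = psTgtL cs (tab.getD j.toNat [])
    · rw [if_pos (hiff.mpr hQ), if_pos rfl, if_pos hQ]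
    · rw [if_neg (fun h => hQ (hiff.mp h)), if_neg (by norm_num), if_neg hQ]
      ring

theorem A_eq_sum (tab : List (List (List Int))) (cs : List (List (Int × Int))) :
    process_structure tab cs =
    ∑ a ∈ Finset.range tab.length, ∑ b ∈ Finset.range tab.length,
      (if a < b then psQI cs tab a b else 0) := by
  dsimp only [process_structure]
  rw [PySem.List.foldl_congr_mem
      (g := fun result i => result + ∑ b ∈ Finset.range tab.length,
        if i.toNat < b then psQI cs tab i.toNat b else 0)]
  · rw [psFoldlAdd _ (fun i : Int => ∑ b ∈ Finset.range tab.length,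
        if i.toNat < b then psQI cs tab i.toNat b else 0) 0]
    rw [PySem.List.pyRange_one, List.map_map, sum_map_range]
    have hm : ((tab.length : Int) - 1 - 0).toNat = tab.length - 1 := by omega
    rw [hm, zero_add]
    have hstep : ∀ k ∈ Finset.range (tab.length - 1),
        ((fun i : Int => ∑ b ∈ Finset.range tab.length,
          if i.toNat < b then psQI cs tab i.toNat b else 0) ∘ (fun k : Nat => 0 + (k:Int))) k
        = ∑ b ∈ Finset.range tab.length, if k < b then psQI cs tab k b else 0 := by
      intro k hk
      have hk' : ((0:Int) + (k:Int)).toNat = k := by omega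
      simp only [Function.comp_apply, hk']
    rw [Finset.sum_congr rfl hstep]
    generalize tab.length = N
    cases N with
    | zero => rfl
    | succ m =>
      rw [Nat.succ_sub_one, Finset.sum_range_succ]
      have hzero : (∑ b ∈ Finset.range (m+1), if m < b then psQI cs tab m b else 0) = 0 := by
        apply Finset.sum_eq_zero
        intro b hb
        rw [Finset.mem_range] at hb
        rw [if_neg (by omega)]
      rw [hzero, add_zero]
  · intro acc i hi
    have hi' : 0 ≤ i := by
      rw [PySem.List.mem_pyRange_one] at hi; omega
    exact psInnerSum tab cs i hi' acc

def psTgtF (consts : List Int) (s : List Int) : List Int :=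
  (s.zip consts).map (fun p => PySem.Int.bxor p.1 p.2)

theorem psSigB (cs : List (List (Int × Int))) (t : List (List Int)) :
    psAltSig cs t = psSigL cs t := by
  unfold psAltSig psSigL
  rw [PySem.List.foldl_append_singleton_eq_map, List.nil_append]
  exact List.map_congr_left (fun eq _ => sigB_eq t eq)

theorem psConstB (cs : List (List (Int × Int))) :
    cs.foldl (fun acc equation => acc ++ [psAltConst equation]) []
      = cs.map (fun eq => psX psHC eq) := by
  rw [PySem.List.foldl_append_singleton_eq_map, List.nil_append]
  exact List.map_congr_left (fun eq _ => constB_eq eq)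

theorem psTgtB (cs : List (List (Int × Int))) (t : List (List Int)) :
    psTgtF (cs.map (fun eq => psX psHC eq)) (psSigL cs t) = psTgtL cs t := by
  unfold psTgtF psSigL psTgtL
  rw [List.zip_map', List.map_map]
  rfl

theorem Bfold1 (consts : List Int) (l : List (List Int)) (d : PySem.Dict (List Int) Int) (acc : Int) :
    (l.foldl (fun (st : PySem.Dict (List Int) Int × Int) s =>
        (st.1.modify s 0 (· + 1), st.2 + st.1.getD (psTgtF consts s) 0)) (d, acc)).1
      = l.foldl (fun d x => d.modify x 0 (· + 1)) d := by
  induction l generalizing d acc with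
  | nil => rfl
  | cons s l ih => exact ih _ _

theorem count_take_nat (l : List (List Int)) (v : List Int) (j : Nat) (hj : j ≤ l.length) :
    (l.take j).count v = ∑ i ∈ Finset.range j, (if l.getD i [] = v then 1 else 0) := by
  induction j with
  | zero => simp
  | succ j ih =>
    have hj' : j < l.length := by omega
    rw [List.take_add_one, List.count_append, ih (by omega), Finset.sum_range_succ]
    rw [List.getElem?_eq_getElem hj']
    simp only [Option.toList_some, List.count_singleton]
    congr 1
    rw [List.getD_eq_getElem l [] hj']
    by_cases h : l[j] = v
    · rw [if_pos h, if_pos (by exact beq_iff_eq.mpr h)]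
    · rw [if_neg h, if_neg (by simpa using h)]

theorem Bfold2 (consts : List Int) (l : List (List Int)) :
    (l.foldl (fun (st : PySem.Dict (List Int) Int × Int) s =>
        (st.1.modify s 0 (· + 1), st.2 + st.1.getD (psTgtF consts s) 0))
      (PySem.Dict.empty, (0:Int))).2
    = ∑ j ∈ Finset.range l.length,
        (((l.take j).count (psTgtF consts (l.getD j []))) : Int) := by
  induction l using List.reverseRecOn with
  | nil => simp
  | append_singleton l s ih =>
    rw [List.foldl_append]
    simp only [List.foldl_cons, List.foldl_nil]
    rw [Bfold1, PySem.Dict.getD_foldl_modify_add_one]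
    rw [ih]
    rw [List.length_append, List.length_cons, List.length_nil]
    rw [Finset.sum_range_succ]
    congr 1
    · apply Finset.sum_congr rfl
      intro j hj
      rw [Finset.mem_range] at hj
      rw [List.take_append_of_le_length (by omega), List.getD_append _ _ _ _ (by omega)]
    · rw [List.take_left]
      have hgd : (l ++ [s]).getD l.length [] = s := by
        rw [List.getD_eq_getElem _ [] (by simp)]
        simp
      rw [hgd]
      simp [PySem.Dict.getD_empty]

theorem getD_map_sig (cs : List (List (Int × Int))) (tab : List (List (List Int)))
    (k : Nat) (hk : k < tab.length) :
    (tab.map (psAltSig cs)).getD k [] = psAltSig cs (tab.getD k []) := by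
  rw [List.getD_eq_getElem _ _ (by simpa using hk), List.getElem_map,
    List.getD_eq_getElem _ _ hk]

theorem B_eq_sum (tab : List (List (List Int))) (cs : List (List (Int × Int))) :
    process_structure_alt tab cs =
    ∑ b ∈ Finset.range tab.length, ∑ a ∈ Finset.range tab.length,
      (if a < b then psQI cs tab a b else 0) := by
  dsimp only [process_structure_alt]
  by_cases hlt : tab.length < 2
  · rw [if_pos hlt]
    symm
    apply Finset.sum_eq_zero
    intro b hb
    apply Finset.sum_eq_zero
    intro a ha
    rw [Finset.mem_range] at hb ha
    rw [if_neg (by omega)]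
  · rw [if_neg hlt]
    rw [psConstB]
    have h2 := Bfold2 (cs.map (fun eq => psX psHC eq)) (tab.map (psAltSig cs))
    simp only [psTgtF] at h2
    rw [h2]
    rw [List.length_map]
    apply Finset.sum_congr rfl
    intro j hj
    rw [Finset.mem_range] at hj
    rw [count_take_nat _ _ _ (by rw [List.length_map]; omega)]
    push_cast
    rw [getD_map_sig cs tab j hj, psSigB]
    have h3 := psTgtB cs (tab.getD j [])
    simp only [psTgtF] at h3
    rw [h3]
    calc ∑ i ∈ Finset.range j,
          (if (tab.map (psAltSig cs)).getD i [] = psTgtL cs (tab.getD j []) then (1:Int) else 0)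
        = ∑ i ∈ Finset.range j, psQI cs tab i j := by
          apply Finset.sum_congr rfl
          intro i hi
          rw [Finset.mem_range] at hi
          rw [getD_map_sig cs tab i (by omega), psSigB]
          rfl
      _ = ∑ a ∈ Finset.range tab.length, (if a < j then psQI cs tab a j else 0) := by
          rw [range_filter_lt j tab.length (by omega), Finset.sum_filter]

-- ===== VERDICT (by name: the statement is the Claim_ definition above) =====
theorem process_structure_spec : Claim_equal_process_structure := by
  intro tab cs _ _
  unfold Spec_process_structure
  rw [A_eq_sum, B_eq_sum]
  exact Finset.sum_comm
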